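-- pv_equiv track=rewrite | github.com/PhilippVerpoort/blue-green-H2 | src/data/export_params.py | __printScenarioValue
-- ===== SOURCE A (Python) =====
-- def __printScenarioValue(name, unit, value):
--     if isinstance(value, dict) and isinstance(list(value.keys())[0], str):
--         r = []
--         for key, val in value.items():
--             r.extend(__printScenarioValue(f"{name} {key}", unit, val))
--         return r
--     elif isinstance(value, dict):
--         return [(name, unit, "{0}: {1}".format(*list(value.items())[0]), "{0}: {1}".format(*list(value.items())[-1]))]
--     else:
--         return [(name, unit, f"2025: {value}", f"2050: {value}")]
-- ===== SOURCE B (Python) =====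
-- def __printScenarioValue(name, unit, value):
--     return [(f"{name} {key}", unit, f"2025: {val}", f"2050: {val}")
--             for key, val in value.items()]
-- ===== Notes on version B (the rewrite author's own statement) =====
-- stated objective: simpler
-- what changed: Replaces the three-branch recursion with a single flat comprehension over the dict items (on the declared domain dict[str,int] the keys are always str and the values never dicts, so the recursion is exactly one level deep).
import Mathlib
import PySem

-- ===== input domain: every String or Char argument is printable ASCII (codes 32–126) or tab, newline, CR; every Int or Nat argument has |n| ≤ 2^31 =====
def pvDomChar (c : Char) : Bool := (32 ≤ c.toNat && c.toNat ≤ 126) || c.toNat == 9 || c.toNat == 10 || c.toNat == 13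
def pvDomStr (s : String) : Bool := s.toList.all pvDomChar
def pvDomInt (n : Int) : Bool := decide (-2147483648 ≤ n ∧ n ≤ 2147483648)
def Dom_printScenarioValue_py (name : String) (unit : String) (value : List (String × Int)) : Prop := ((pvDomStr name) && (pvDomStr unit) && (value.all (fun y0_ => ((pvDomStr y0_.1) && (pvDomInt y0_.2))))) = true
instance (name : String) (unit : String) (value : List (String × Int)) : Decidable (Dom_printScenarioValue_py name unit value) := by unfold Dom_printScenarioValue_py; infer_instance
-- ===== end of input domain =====

-- B replaces A's three-branch recursion by a single flat map over the dict items (on this domain the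
-- recursion is one level deep); same cost, simpler shape. On the empty dict A raises IndexError, B returns [].


-- ===== PORT A =====
-- value is a Python dict[str,int]: the assoc list is canonicalised by PySem.Dict.ofList (dict
-- construction: first-occurrence position, last value). On this domain every key is a str, so the first
-- branch is taken whenever the dict is nonempty; each recursive call receives an int and takes the
-- else branch (inlined here as aScalarRow). On the empty dict Python raises IndexError at
-- list(value.keys())[0]; that input is excluded by Pre_ (the port returns [] there).
def aScalarRow (name : String) (unit : String) (v : Int) : List (String × String × String × String) :=
  [(name, unit, "2025: " ++ PySem.Int.toStr v, "2050: " ++ PySem.Int.toStr v)]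

-- the 'for key, val in value.items(): r.extend(__printScenarioValue(f"{name} {key}", unit, val))' loop
def aLoop (name : String) (unit : String) : List (String × Int) → List (String × String × String × String)
  | [] => []
  | (key, val) :: rest => aScalarRow (name ++ " " ++ key) unit val ++ aLoop name unit rest

def printScenarioValue_py (name : String) (unit : String) (value : List (String × Int)) : List (String × String × String × String) :=
  match (PySem.Dict.ofList value).items with
  | [] => []  -- Python raises IndexError here; excluded by Pre_
  | items@(_ :: _) => aLoop name unit items

-- ===== PORT B =====
def printScenarioValue_py_alt (name : String) (unit : String) (value : List (String × Int)) : List (String × String × String × String) :=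
  (PySem.Dict.ofList value).items.map
    (fun kv => (name ++ " " ++ kv.1, unit, "2025: " ++ PySem.Int.toStr kv.2, "2050: " ++ PySem.Int.toStr kv.2))

-- ===== PRECONDITION & SPEC =====
-- Pre_ excludes only the empty dict, on which A raises IndexError at list(value.keys())[0].
def Pre_printScenarioValue_py (name : String) (unit : String) (value : List (String × Int)) : Prop := value ≠ []
instance (name : String) (unit : String) (value : List (String × Int)) : Decidable (Pre_printScenarioValue_py name unit value) := by unfold Pre_printScenarioValue_py; infer_instance

def pvWitness_printScenarioValue_py : String × String × (List (String × Int)) := ("cost", "EUR", [("low", 1), ("high", 25)])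

def Spec_printScenarioValue_py (name : String) (unit : String) (value : List (String × Int)) (out : List (String × String × String × String)) : Prop := out = printScenarioValue_py_alt name unit value
instance (name : String) (unit : String) (value : List (String × Int)) (out : List (String × String × String × String)) : Decidable (Spec_printScenarioValue_py name unit value out) := by unfold Spec_printScenarioValue_py; infer_instance

-- ===== CLAIM (what is proved, stated in full; the proofs are below) =====
def Claim_equal_printScenarioValue_py : Prop := ∀ (name : String) (unit : String) (value : List (String × Int)), Dom_printScenarioValue_py name unit value → Pre_printScenarioValue_py name unit value → Spec_printScenarioValue_py name unit value (printScenarioValue_py name unit value)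


-- ===== LEMMAS AND PROOFS =====
-- A's extend-loop produces exactly B's map, row by row.
theorem aLoop_eq_map (name unit : String) (l : List (String × Int)) :
    aLoop name unit l = l.map (fun kv => (name ++ " " ++ kv.1, unit, "2025: " ++ PySem.Int.toStr kv.2, "2050: " ++ PySem.Int.toStr kv.2)) := by
  induction l with
  | nil => rfl
  | cons hd tl ih => cases hd; simp [aLoop, aScalarRow, ih]

-- ===== VERDICT (by name: the statement is the Claim_ definition above) =====
theorem printScenarioValue_py_spec : Claim_equal_printScenarioValue_py := by
  intro name unit value _ _
  unfold Spec_printScenarioValue_py printScenarioValue_py printScenarioValue_py_alt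
  cases h : (PySem.Dict.ofList value).items with
  | nil => simp
  | cons hd tl => simp [aLoop_eq_map]
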